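-- pv_equiv track=rewrite | github.com/phil-huynh/Problem-Sets | python/SJP_problem_set/indefinite_loops/sat_without_studying.py | best_student_and_score
-- ===== SOURCE A (Python) =====
-- def best_student_and_score(answer_key):
--     score_azami = 0
--     score_baz = 0
--     score_caris = 0
--
--     azami = ["A", "B", "C"]
--     baz = ["B", "A", "B", "C"]
--     caris = ["A", "A", "C", "C", "B", "B"]
--
--     for i, answer in enumerate(answer_key):
--       if answer == azami[i%3]:
--         score_azami += 1
--       if answer == baz[i%4]:
--         score_baz += 1
--       if answer == caris[i%6]:
--         score_caris += 1
--
--     highest = max(score_azami, score_baz, score_caris)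
--
--     if highest == score_azami:
--       return score_azami, "Azami"
--     if highest == score_baz:
--       return score_baz, "Baz"
--     if highest == score_caris:
--       return score_caris, "Caris"
-- ===== SOURCE B (Python) =====
-- def best_student_and_score(answer_key):
--     def score(pattern):
--         return sum(a == pattern[i % len(pattern)] for i, a in enumerate(answer_key))
--     contestants = [("Azami", ["A", "B", "C"]),
--                    ("Baz", ["B", "A", "B", "C"]),
--                    ("Caris", ["A", "A", "C", "C", "B", "B"])]
--     results = [(score(pattern), name) for name, pattern in contestants]
--     return max(results, key=lambda r: r[0])
-- ===== Notes on version B (the rewrite author's own statement) =====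
-- stated objective: simpler
-- what changed: Replace the single combined loop over three ad-hoc counters plus a max/if-return chain by a per-contestant score helper mapped over a (name, pattern) list and a first-maximal max(..., key=score) selection.
import Mathlib
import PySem

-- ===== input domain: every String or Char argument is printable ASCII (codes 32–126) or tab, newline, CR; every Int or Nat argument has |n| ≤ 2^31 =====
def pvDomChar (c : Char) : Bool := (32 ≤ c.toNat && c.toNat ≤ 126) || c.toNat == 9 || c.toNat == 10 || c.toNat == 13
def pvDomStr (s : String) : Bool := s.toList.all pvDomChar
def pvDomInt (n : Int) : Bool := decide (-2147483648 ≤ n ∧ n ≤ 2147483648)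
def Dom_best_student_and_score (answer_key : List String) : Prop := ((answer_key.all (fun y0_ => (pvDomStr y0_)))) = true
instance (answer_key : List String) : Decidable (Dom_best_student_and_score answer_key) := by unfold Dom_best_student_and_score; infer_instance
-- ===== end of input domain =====

-- B replaces A's one combined three-counter loop + max/if chain by a per-contestant
-- scoring helper mapped over (name, pattern) pairs and a first-maximal selection (simpler).

-- ===== PORT A =====
-- the pattern indices i%3, i%4, i%6 are always in range, so pyGet? returns some _;
-- the option-level comparison `some answer = pyGet? pattern idx` is exact for `answer == pattern[idx]`
def best_student_and_score (answer_key : List String) : Int × String :=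
  let azami : List String := ["A", "B", "C"]
  let baz : List String := ["B", "A", "B", "C"]
  let caris : List String := ["A", "A", "C", "C", "B", "B"]
  let s : Int × Int × Int :=
    (PySem.List.enumerate answer_key).foldl
      (fun (s : Int × Int × Int) (p : Int × String) =>
        let s1 := if some p.2 = PySem.List.pyGet? azami (PySem.Int.mod p.1 3) then s.1 + 1 else s.1
        let s2 := if some p.2 = PySem.List.pyGet? baz (PySem.Int.mod p.1 4) then s.2.1 + 1 else s.2.1
        let s3 := if some p.2 = PySem.List.pyGet? caris (PySem.Int.mod p.1 6) then s.2.2 + 1 else s.2.2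
        (s1, s2, s3))
      (0, 0, 0)
  let highest := max s.1 (max s.2.1 s.2.2)
  if highest = s.1 then (s.1, "Azami")
  else if highest = s.2.1 then (s.2.1, "Baz")
  else (s.2.2, "Caris")  -- Python's last `if highest == score_caris` is always true here

-- ===== PORT B =====
-- score helper: sum(a == pattern[i % len(pattern)] for i, a in enumerate(answer_key))
def pvScoreB (answer_key pattern : List String) : Int :=
  (PySem.List.enumerate answer_key).foldl
    (fun (acc : Int) (p : Int × String) =>
      acc + (if some p.2 = PySem.List.pyGet? pattern (PySem.Int.mod p.1 (pattern.length : Int)) then 1 else 0))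
    0

def best_student_and_score_alt (answer_key : List String) : Int × String :=
  let contestants : List (String × List String) :=
    [("Azami", ["A", "B", "C"]), ("Baz", ["B", "A", "B", "C"]), ("Caris", ["A", "A", "C", "C", "B", "B"])]
  let results := contestants.map (fun nc => (pvScoreB answer_key nc.2, nc.1))
  -- max(results, key=lambda r: r[0]): first maximal element; results is nonempty by construction
  match results with
  | [] => (0, "")
  | r :: rs => rs.foldl (fun best r => if r.1 > best.1 then r else best) r

-- ===== PRECONDITION & SPEC =====
def Spec_best_student_and_score (answer_key : List String) (out : Int × String) : Prop := out = best_student_and_score_alt answer_key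
instance (answer_key : List String) (out : Int × String) : Decidable (Spec_best_student_and_score answer_key out) := by unfold Spec_best_student_and_score; infer_instance

-- ===== CLAIM (what is proved, stated in full; the proofs are below) =====
def Claim_equal_best_student_and_score : Prop := ∀ (answer_key : List String), Dom_best_student_and_score answer_key → Spec_best_student_and_score answer_key (best_student_and_score answer_key)

-- ===== LEMMAS AND PROOFS =====

theorem pv_ite_add_one (c : Prop) [Decidable c] (a : Int) :
    (if c then a + 1 else a) = a + (if c then 1 else 0) := by split <;> omega

-- A's combined loop steps the three counters exactly as B's three independent score folds do
theorem pv_loop_split (azami baz caris : List String) (xs : List String) : ∀ (n : Int) (a b c : Int),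
    (PySem.List.enumerate xs n).foldl
      (fun (s : Int × Int × Int) (p : Int × String) =>
        let s1 := if some p.2 = PySem.List.pyGet? azami (PySem.Int.mod p.1 3) then s.1 + 1 else s.1
        let s2 := if some p.2 = PySem.List.pyGet? baz (PySem.Int.mod p.1 4) then s.2.1 + 1 else s.2.1
        let s3 := if some p.2 = PySem.List.pyGet? caris (PySem.Int.mod p.1 6) then s.2.2 + 1 else s.2.2
        (s1, s2, s3))
      (a, b, c)
    = ((PySem.List.enumerate xs n).foldl
          (fun acc p => acc + (if some p.2 = PySem.List.pyGet? azami (PySem.Int.mod p.1 3) then 1 else 0)) a,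
       (PySem.List.enumerate xs n).foldl
          (fun acc p => acc + (if some p.2 = PySem.List.pyGet? baz (PySem.Int.mod p.1 4) then 1 else 0)) b,
       (PySem.List.enumerate xs n).foldl
          (fun acc p => acc + (if some p.2 = PySem.List.pyGet? caris (PySem.Int.mod p.1 6) then 1 else 0)) c) := by
  induction xs with
  | nil => intro n a b c; simp [PySem.List.enumerate_nil]
  | cons x t ih =>
      intro n a b c
      simp only [PySem.List.enumerate_cons, List.foldl]
      rw [ih]
      rw [pv_ite_add_one, pv_ite_add_one, pv_ite_add_one]

-- the selection step: max/if-return chain = first-maximal running fold over the three results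
theorem pv_select (sa sb sc : Int) :
    (if max sa (max sb sc) = sa then (sa, "Azami")
     else if max sa (max sb sc) = sb then (sb, "Baz")
     else (sc, "Caris"))
    = [(sb, "Baz"), (sc, "Caris")].foldl
        (fun (best r : Int × String) => if r.1 > best.1 then r else best) (sa, "Azami") := by
  simp only [List.foldl, max_def]
  split_ifs <;> first | rfl | omega

-- ===== VERDICT (by name: the statement is the Claim_ definition above) =====
theorem best_student_and_score_spec : Claim_equal_best_student_and_score := by
  intro answer_key _
  unfold Spec_best_student_and_score best_student_and_score best_student_and_score_alt pvScoreB
  simp only [List.map, List.length_cons, List.length_nil, Nat.reduceAdd, Nat.cast_ofNat]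
  rw [pv_loop_split]
  exact pv_select _ _ _
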